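-- pv_equiv track=rewrite | github.com/AlexTuisov/HW2 | HW2_submission/4_submission/ex2.py | check_if_it_I
-- ===== SOURCE A (Python) =====
-- def check_if_it_I(observation, turn_number, index):
--     letter_number,line_number,current_turn = 0,0,0
--     for turn in observation:
--         if current_turn == turn_number:
--             for line in turn:
--                 if line_number == index[0]:
--                     for letter in line:
--                         if letter_number == index[1]:
--                             if letter == "I":
--                                 return True
--                             else:
--                                 return False
--                         letter_number = letter_number + 1
--                 line_number = line_number + 1
--         current_turn = current_turn + 1
--     return False
-- ===== SOURCE B (Python) =====
-- def check_if_it_I(observation, turn_number, index):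
--     row, col = index
--     if turn_number < 0 or row < 0 or col < 0:
--         return False
--     try:
--         return observation[turn_number][row][col] == "I"
--     except IndexError:
--         return False
-- ===== Notes on version B (the rewrite author's own statement) =====
-- stated objective: simpler
-- what changed: Replaces the triple nested counting scan with one direct indexed access guarded against negative indices, returning False on IndexError.
import Mathlib
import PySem

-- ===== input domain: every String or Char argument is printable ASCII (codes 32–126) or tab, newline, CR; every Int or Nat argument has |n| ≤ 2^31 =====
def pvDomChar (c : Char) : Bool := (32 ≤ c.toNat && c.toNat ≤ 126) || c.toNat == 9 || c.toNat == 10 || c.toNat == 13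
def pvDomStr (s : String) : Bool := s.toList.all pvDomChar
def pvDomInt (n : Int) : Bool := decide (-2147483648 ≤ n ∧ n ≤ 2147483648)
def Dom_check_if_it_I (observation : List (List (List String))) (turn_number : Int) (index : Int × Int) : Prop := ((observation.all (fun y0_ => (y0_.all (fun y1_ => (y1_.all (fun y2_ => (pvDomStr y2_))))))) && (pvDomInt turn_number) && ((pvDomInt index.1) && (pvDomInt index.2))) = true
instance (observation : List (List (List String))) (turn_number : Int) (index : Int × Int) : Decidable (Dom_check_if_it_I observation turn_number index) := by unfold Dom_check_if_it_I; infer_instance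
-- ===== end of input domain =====

-- ===== PORT A =====
-- B replaces A's triple nested counting scan by one direct indexed access (guarded against negative indices); objective: simpler.
-- Literal port of A: the three nested for-loops with their shared counters letter_number / line_number / current_turn.
def pvScanLine : List String → Int → Int → Option Bool × Int
  | [], letterN, _ => (none, letterN)
  | letter :: rest, letterN, col =>
    if letterN = col then (some (letter == "I"), letterN)
    else pvScanLine rest (letterN + 1) col

def pvScanTurn : List (List String) → Int → Int → Int → Int → Option Bool × Int × Int
  | [], lineN, letterN, _, _ => (none, lineN, letterN)
  | line :: rest, lineN, letterN, row, col =>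
    if lineN = row then
      match pvScanLine line letterN col with
      | (some b, ln') => (some b, lineN + 1, ln')
      | (none, ln') => pvScanTurn rest (lineN + 1) ln' row col
    else pvScanTurn rest (lineN + 1) letterN row col

def pvOuter : List (List (List String)) → Int → Int → Int → Int → Int → Int → Bool
  | [], _, _, _, _, _, _ => false
  | turn :: rest, curT, lineN, letterN, tgt, row, col =>
    if curT = tgt then
      match pvScanTurn turn lineN letterN row col with
      | (some b, _, _) => b
      | (none, lineN', letterN') => pvOuter rest (curT + 1) lineN' letterN' tgt row col
    else pvOuter rest (curT + 1) lineN letterN tgt row col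

def check_if_it_I (observation : List (List (List String))) (turn_number : Int) (index : Int × Int) : Bool :=
  pvOuter observation 0 0 0 turn_number index.1 index.2

-- ===== PORT B =====
def check_if_it_I_alt (observation : List (List (List String))) (turn_number : Int) (index : Int × Int) : Bool :=
  if turn_number < 0 || index.1 < 0 || index.2 < 0 then false
  else
    match PySem.List.pyGet? observation turn_number with
    | none => false
    | some turn =>
      match PySem.List.pyGet? turn index.1 with
      | none => false
      | some line =>
        match PySem.List.pyGet? line index.2 with
        | none => false
        | some letter => letter == "I"

-- ===== PRECONDITION & SPEC =====
def Spec_check_if_it_I (observation : List (List (List String))) (turn_number : Int) (index : Int × Int) (out : Bool) : Prop := out = check_if_it_I_alt observation turn_number index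
instance (observation : List (List (List String))) (turn_number : Int) (index : Int × Int) (out : Bool) : Decidable (Spec_check_if_it_I observation turn_number index out) := by unfold Spec_check_if_it_I; infer_instance

-- ===== CLAIM (what is proved, stated in full; the proofs are below) =====
def Claim_equal_check_if_it_I : Prop := ∀ (observation : List (List (List String))) (turn_number : Int) (index : Int × Int), Dom_check_if_it_I observation turn_number index → Spec_check_if_it_I observation turn_number index (check_if_it_I observation turn_number index)

-- ===== LEMMAS AND PROOFS =====

theorem pvScanLine_eq (line : List String) (letterN col : Int) :
    pvScanLine line letterN col =
      if letterN ≤ col then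
        match getElem? line (col - letterN).toNat with
        | some letter => (some (letter == "I"), col)
        | none => (none, letterN + line.length)
      else (none, letterN + line.length) := by
  induction line generalizing letterN with
  | nil => simp [pvScanLine]
  | cons letter rest ih =>
    simp only [pvScanLine]
    split
    next h =>
      subst h
      simp
    next h =>
      rw [ih (letterN + 1)]
      by_cases h2 : letterN ≤ col
      · have h3 : letterN + 1 ≤ col := by omega
        have h4 : (col - letterN).toNat = (col - (letterN + 1)).toNat + 1 := by omega
        simp only [if_pos h2, if_pos h3, h4, List.getElem?_cons_succ, List.length_cons]
        split
        · simp
        · simp; omega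
      · have h3 : ¬ letterN + 1 ≤ col := by omega
        simp only [if_neg h2, if_neg h3, List.length_cons, Prod.mk.injEq, true_and]
        push_cast
        omega

theorem pvScanTurn_fst (lines : List (List String)) (lineN letterN row col : Int) :
    (pvScanTurn lines lineN letterN row col).1 =
      if lineN ≤ row then
        match getElem? lines (row - lineN).toNat with
        | some line => (pvScanLine line letterN col).1
        | none => none
      else none := by
  induction lines generalizing lineN letterN with
  | nil => simp [pvScanTurn]
  | cons line rest ih =>
    simp only [pvScanTurn]
    split
    next h =>
      subst h
      rcases hs : pvScanLine line letterN col with ⟨ob, ln'⟩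
      cases ob with
      | some b => simp [hs]
      | none =>
        simp only
        rw [ih (lineN + 1) ln']
        have hn : ¬ lineN + 1 ≤ lineN := by omega
        simp [hn, hs]
    next h =>
      by_cases h2 : lineN ≤ row
      · have h3 : lineN + 1 ≤ row := by omega
        have h4 : (row - lineN).toNat = (row - (lineN + 1)).toNat + 1 := by omega
        rw [ih (lineN + 1) letterN]
        simp [h2, h3, h4]
      · have h3 : ¬ lineN + 1 ≤ row := by omega
        rw [ih (lineN + 1) letterN]
        simp [h2, h3]

theorem pvOuter_eq (obs : List (List (List String))) (curT lineN letterN tgt row col : Int) :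
    pvOuter obs curT lineN letterN tgt row col =
      if curT ≤ tgt then
        match getElem? obs (tgt - curT).toNat with
        | some turn =>
          match (pvScanTurn turn lineN letterN row col).1 with
          | some b => b
          | none => false
        | none => false
      else false := by
  induction obs generalizing curT lineN letterN with
  | nil => simp [pvOuter]
  | cons turn rest ih =>
    simp only [pvOuter]
    split
    next h =>
      subst h
      rcases hs : pvScanTurn turn lineN letterN row col with ⟨ob, lineN', letterN'⟩
      cases ob with
      | some b => simp [hs]
      | none =>
        simp only
        rw [ih (curT + 1) lineN' letterN']
        have hn : ¬ curT + 1 ≤ curT := by omega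
        simp [hn, hs]
    next h =>
      by_cases h2 : curT ≤ tgt
      · have h3 : curT + 1 ≤ tgt := by omega
        have h4 : (tgt - curT).toNat = (tgt - (curT + 1)).toNat + 1 := by omega
        rw [ih (curT + 1) lineN letterN]
        simp [h2, h3, h4]
      · have h3 : ¬ curT + 1 ≤ tgt := by omega
        rw [ih (curT + 1) lineN letterN]
        simp [h2, h3]

-- ===== VERDICT (by name: the statement is the Claim_ definition above) =====
theorem check_if_it_I_spec : Claim_equal_check_if_it_I := by
  intro obs tgt idx _
  unfold Spec_check_if_it_I check_if_it_I check_if_it_I_alt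
  rcases idx with ⟨row, col⟩
  simp only
  rw [pvOuter_eq]
  by_cases ht : 0 ≤ tgt
  · rw [if_pos ht, PySem.List.pyGet?_of_nonneg _ ht]
    simp only [Int.sub_zero]
    cases hobs : getElem? obs tgt.toNat with
    | none => simp [show ¬ tgt < 0 by omega]
    | some turn =>
      dsimp only
      rw [pvScanTurn_fst]
      by_cases hr : 0 ≤ row
      · rw [if_pos hr, PySem.List.pyGet?_of_nonneg _ hr]
        simp only [Int.sub_zero]
        cases hturn : getElem? turn row.toNat with
        | none => simp [show ¬ tgt < 0 by omega, show ¬ row < 0 by omega]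
        | some line =>
          dsimp only
          rw [pvScanLine_eq]
          by_cases hc : 0 ≤ col
          · rw [if_pos hc, PySem.List.pyGet?_of_nonneg _ hc]
            simp only [Int.sub_zero]
            cases hline : getElem? line col.toNat with
            | none =>
              simp [show ¬ tgt < 0 by omega, show ¬ row < 0 by omega,
                show ¬ col < 0 by omega]
            | some letter =>
              simp [show ¬ tgt < 0 by omega, show ¬ row < 0 by omega,
                show ¬ col < 0 by omega]
          · rw [if_neg hc]
            simp [show col < 0 by omega]
      · rw [if_neg hr]
        simp [show row < 0 by omega]
  · rw [if_neg ht]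
    simp [show tgt < 0 by omega]
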